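-- pv_equiv track=rewrite | github.com/ind1xa/opm | simetricniBlokDizajni.py | nijeBalansiran
-- ===== SOURCE A (Python) =====
-- v = 13         #početni skup je veličine v, tolko ima i blokova
--
-- alpha = 1     #svake dvije točke skupa v nalaze se istovremeno u alpha blokova
--
-- def nijeBalansiran(paroviIzV, dizajn):
--     for x in paroviIzV:
--         count = 0
--         for y in dizajn:
--             if set(x).issubset(y):
--                 count += 1
--                 if (count > alpha): return True
--         if (count + (v - len(dizajn)) < alpha): return True
--     return False
-- ===== SOURCE B (Python) =====
-- v = 13
--
-- alpha = 1
--
-- def nijeBalansiran(paroviIzV, dizajn):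
--     n = len(dizajn)
--     # inverted index: point -> list of indices of blocks containing it (increasing, no dups)
--     index = {}
--     for i, y in enumerate(dizajn):
--         for p in set(y):
--             index.setdefault(p, []).append(i)
--     for x in paroviIzV:
--         pts = list(dict.fromkeys(x))   # distinct points of x, first occurrences
--         if pts:
--             common = index.get(pts[0], [])
--             for q in pts[1:]:
--                 occ = set(index.get(q, []))   # set used for membership tests
--                 common = [i for i in common if i in occ]
--             count = len(common)
--         else:
--             count = n
--         if count > alpha or count + (v - n) < alpha:
--             return True
--     return False
-- ===== Notes on version B (the rewrite author's own statement) =====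
-- stated objective: alternative
-- what changed: A re-scans every block for every pair; B builds an inverted index point->block-indices in one pass over the blocks and gets each pair's co-occurrence count by intersecting the occurrence lists of its points.
import Mathlib
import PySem

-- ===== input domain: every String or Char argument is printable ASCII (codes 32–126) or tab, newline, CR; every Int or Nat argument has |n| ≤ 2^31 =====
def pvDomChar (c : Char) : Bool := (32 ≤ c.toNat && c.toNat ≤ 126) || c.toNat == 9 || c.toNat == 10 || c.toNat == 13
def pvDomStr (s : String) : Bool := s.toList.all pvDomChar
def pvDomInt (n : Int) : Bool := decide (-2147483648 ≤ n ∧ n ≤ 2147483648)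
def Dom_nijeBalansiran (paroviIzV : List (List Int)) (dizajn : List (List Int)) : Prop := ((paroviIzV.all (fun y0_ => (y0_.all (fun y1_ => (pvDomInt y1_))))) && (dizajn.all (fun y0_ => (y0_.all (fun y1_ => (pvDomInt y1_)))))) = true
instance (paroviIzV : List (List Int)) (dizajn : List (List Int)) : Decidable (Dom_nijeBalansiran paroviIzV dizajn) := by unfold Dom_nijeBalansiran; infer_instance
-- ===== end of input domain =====

-- ===== PORT A =====
-- B changes the algorithm: A scans all blocks per pair; B builds an inverted index
-- point -> block indices once and intersects occurrence lists per pair.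

-- set(x).issubset(y)
def pvIssub (x y : List Int) : Bool := (PySem.Set.ofList x).all (fun a => y.contains a)

-- A's inner loop over dizajn with early `return True` once count > alpha (= 1);
-- none = returned True, some c = finished with count c
def pvLoopA (x : List Int) : List (List Int) → Int → Option Int
  | [], count => some count
  | y :: rest, count =>
    if pvIssub x y then
      if count + 1 > 1 then none
      else pvLoopA x rest (count + 1)
    else pvLoopA x rest count

-- A's outer loop over paroviIzV (v = 13, alpha = 1 module constants)
def pvOuterA (dizajn : List (List Int)) : List (List Int) → Bool
  | [] => false
  | x :: xs =>
    match pvLoopA x dizajn 0 with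
    | none => true
    | some c => if c + (13 - (dizajn.length : Int)) < 1 then true else pvOuterA dizajn xs

def nijeBalansiran (paroviIzV : List (List Int)) (dizajn : List (List Int)) : Bool :=
  pvOuterA dizajn paroviIzV

-- ===== PORT B =====
-- index.setdefault(p, []).append(i) over p in set(y), over (i, y) in enumerate(dizajn)
def pvBuildIndex (dizajn : List (List Int)) : PySem.Dict Int (List Int) :=
  (PySem.List.enumerate dizajn 0).foldl
    (fun d iy => (PySem.Set.ofList iy.2).foldl (fun d p => d.modify p [] (· ++ [iy.1])) d)
    PySem.Dict.empty

-- for q in pts[1:]: occ = set(index.get(q, [])); common = [i for i in common if i in occ]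
def pvInterLoop (idx : PySem.Dict Int (List Int)) (common : List Int) : List Int → List Int
  | [] => common
  | q :: qs => pvInterLoop idx (common.filter (fun i => (PySem.Set.ofList (idx.getD q [])).contains i)) qs

-- per-pair count for B
def pvCountB (idx : PySem.Dict Int (List Int)) (n : Int) (x : List Int) : Int :=
  match PySem.List.dedup x with
  | [] => n
  | p :: rest => ((pvInterLoop idx (idx.getD p []) rest).length : Int)

def pvOuterB (idx : PySem.Dict Int (List Int)) (n : Int) : List (List Int) → Bool
  | [] => false
  | x :: xs =>
    let c := pvCountB idx n x
    if c > 1 || c + (13 - n) < 1 then true else pvOuterB idx n xs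

def nijeBalansiran_alt (paroviIzV : List (List Int)) (dizajn : List (List Int)) : Bool :=
  pvOuterB (pvBuildIndex dizajn) (dizajn.length : Int) paroviIzV

-- ===== PRECONDITION & SPEC =====
def Spec_nijeBalansiran (paroviIzV : List (List Int)) (dizajn : List (List Int)) (out : Bool) : Prop := out = nijeBalansiran_alt paroviIzV dizajn
instance (paroviIzV : List (List Int)) (dizajn : List (List Int)) (out : Bool) : Decidable (Spec_nijeBalansiran paroviIzV dizajn out) := by unfold Spec_nijeBalansiran; infer_instance

-- ===== CLAIM (what is proved, stated in full; the proofs are below) =====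
def Claim_equal_nijeBalansiran : Prop := ∀ (paroviIzV : List (List Int)) (dizajn : List (List Int)), Dom_nijeBalansiran paroviIzV dizajn → Spec_nijeBalansiran paroviIzV dizajn (nijeBalansiran paroviIzV dizajn)

-- ===== LEMMAS AND PROOFS =====

-- pts.all (· ∈ y)
def pvAllIn (pts y : List Int) : Bool := pts.all (fun a => y.contains a)

-- spec: indices (from s) of blocks containing all of pts
def pvOcc (pts : List Int) : List (List Int) → Int → List Int
  | [], _ => []
  | y :: rest, s => (if pvAllIn pts y then [s] else []) ++ pvOcc pts rest (s + 1)

lemma pvIssub_eq (x y : List Int) : pvIssub x y = pvAllIn (PySem.List.dedup x) y := by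
  simp [pvIssub, pvAllIn]

lemma pvOcc_mem_ge (pts : List Int) (dz : List (List Int)) (s i : Int)
    (h : i ∈ pvOcc pts dz s) : s ≤ i := by
  induction dz generalizing s with
  | nil => simp [pvOcc] at h
  | cons y rest ih =>
    simp only [pvOcc, List.mem_append] at h
    rcases h with h | h
    · split at h <;> simp_all
    · have := ih (s + 1) h; omega

lemma pvOcc_length (pts : List Int) (dz : List (List Int)) (s : Int) :
    (pvOcc pts dz s).length = (dz.filter (fun y => pvAllIn pts y)).length := by
  induction dz generalizing s with
  | nil => simp [pvOcc]
  | cons y rest ih =>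
    simp only [pvOcc, List.length_append, List.filter_cons, ih]
    split <;> simp_all <;> omega

lemma pvFilter_nodup_eq (l : List Int) (p : Int) (h : l.Nodup) :
    l.filter (fun q => q == p) = if l.contains p then [p] else [] := by
  induction l with
  | nil => simp
  | cons a rest ih =>
    simp only [List.nodup_cons] at h
    by_cases hap : a = p
    · subst hap
      have : rest.filter (fun q => q == a) = [] := by
        apply List.filter_eq_nil_iff.mpr
        intro q hq
        simp only [beq_iff_eq]
        intro hqa; exact h.1 (hqa ▸ hq)
      simp [this]
    · simp only [List.filter_cons, beq_iff_eq, hap, if_false, List.contains_cons]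
      rw [ih h.2]
      have hpa : ¬ p = a := fun hh => hap hh.symm
      have : (a == p) = false := by simp [hap]
      simp [hpa]

-- one block's inner fold: appends i to exactly the keys occurring in y
lemma pvBuildStep (y : List Int) (i : Int) (d : PySem.Dict Int (List Int)) (p : Int) :
    ((PySem.Set.ofList y).foldl (fun d q => d.modify q [] (· ++ [i])) d).getD p []
      = d.getD p [] ++ (if y.contains p then [i] else []) := by
  have hmap : (PySem.Set.ofList y).foldl (fun d q => d.modify q [] (· ++ [i])) d
      = ((PySem.Set.ofList y).map (fun q => (q, i))).foldl (fun d pr => d.modify pr.1 [] (· ++ [pr.2])) d := by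
    rw [List.foldl_map]
  rw [hmap, PySem.Dict.getD_foldl_modify_append]
  congr 1
  rw [List.filter_map, List.map_map]
  have hpred : ((fun pr : Int × Int => pr.1 == p) ∘ fun q => (q, i)) = fun q => q == p := rfl
  rw [hpred, pvFilter_nodup_eq _ _ (PySem.Set.nodup_ofList y)]
  by_cases hm : p ∈ y
  · simp [List.contains_iff_mem, PySem.Set.mem_ofList, hm]
  · simp [List.contains_iff_mem, PySem.Set.mem_ofList, hm]

lemma pvBuild_getD (dz : List (List Int)) (s : Int) (d : PySem.Dict Int (List Int)) (p : Int) :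
    ((PySem.List.enumerate dz s).foldl
      (fun d iy => (PySem.Set.ofList iy.2).foldl (fun d q => d.modify q [] (· ++ [iy.1])) d) d).getD p []
    = d.getD p [] ++ pvOcc [p] dz s := by
  induction dz generalizing s d with
  | nil => simp [PySem.List.enumerate_nil, pvOcc]
  | cons y rest ih =>
    rw [PySem.List.enumerate_cons, List.foldl_cons, ih, pvBuildStep]
    simp only [pvOcc, pvAllIn, List.all_cons, List.all_nil, Bool.and_true, List.append_assoc]

lemma pvBuildIndex_getD (dz : List (List Int)) (p : Int) :
    (pvBuildIndex dz).getD p [] = pvOcc [p] dz 0 := by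
  unfold pvBuildIndex
  rw [pvBuild_getD]
  simp [PySem.Dict.getD_empty]

lemma pvOcc_filter (pts : List Int) (q : Int) (dz : List (List Int)) (s : Int) :
    (pvOcc pts dz s).filter (fun i => decide (i ∈ pvOcc [q] dz s)) = pvOcc (pts ++ [q]) dz s := by
  induction dz generalizing s with
  | nil => simp [pvOcc]
  | cons y rest ih =>
    rw [show pvOcc pts (y :: rest) s = (if pvAllIn pts y then [s] else []) ++ pvOcc pts rest (s + 1) from rfl,
        show pvOcc (pts ++ [q]) (y :: rest) s
          = (if pvAllIn (pts ++ [q]) y then [s] else []) ++ pvOcc (pts ++ [q]) rest (s + 1) from rfl,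
        List.filter_append]
    have hall : pvAllIn (pts ++ [q]) y = (pvAllIn pts y && y.contains q) := by
      simp [pvAllIn]
    have htail : (pvOcc pts rest (s + 1)).filter (fun i => decide (i ∈ pvOcc [q] (y :: rest) s))
        = (pvOcc pts rest (s + 1)).filter (fun i => decide (i ∈ pvOcc [q] rest (s + 1))) := by
      apply List.filter_congr
      intro i hi
      have hge : s + 1 ≤ i := pvOcc_mem_ge _ _ _ _ hi
      have hiff : i ∈ pvOcc [q] (y :: rest) s ↔ i ∈ pvOcc [q] rest (s + 1) := by
        simp only [pvOcc, List.mem_append]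
        constructor
        · rintro (h | h)
          · split at h <;> simp_all <;> omega
          · exact h
        · intro h; right; exact h
      exact decide_eq_decide.mpr hiff
    rw [htail, ih, hall]
    congr 1
    by_cases hp : pvAllIn pts y
    · simp only [hp, if_true, Bool.true_and]
      have hhead : pvAllIn [q] y = y.contains q := by simp [pvAllIn]
      by_cases hq : y.contains q
      · have hqm : q ∈ y := List.contains_iff_mem.mp hq
        have hmem : s ∈ pvOcc [q] (y :: rest) s := by
          simp only [pvOcc, hhead, hq, if_true, List.mem_append]
          left; exact List.mem_singleton.mpr rfl
        simp [List.filter_cons, hmem, hqm, hq]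
      · have hqm : q ∉ y := fun h => hq (List.contains_iff_mem.mpr h)
        have hmem : s ∉ pvOcc [q] (y :: rest) s := by
          simp only [pvOcc, hhead, hq]
          intro hmem
          have := pvOcc_mem_ge [q] rest (s + 1) s hmem; omega
        simp [List.filter_cons, hmem, hqm, hq]
    · simp [hp]

lemma pvInterLoop_occ (dz : List (List Int)) (qs pts : List Int) :
    pvInterLoop (pvBuildIndex dz) (pvOcc pts dz 0) qs = pvOcc (pts ++ qs) dz 0 := by
  induction qs generalizing pts with
  | nil => simp [pvInterLoop]
  | cons q rest ih =>
    simp only [pvInterLoop, pvBuildIndex_getD]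
    have hcf : (pvOcc pts dz 0).filter (fun i => (PySem.Set.ofList (pvOcc [q] dz 0)).contains i)
        = (pvOcc pts dz 0).filter (fun i => decide (i ∈ pvOcc [q] dz 0)) := by
      apply List.filter_congr
      intro i _
      by_cases hm : i ∈ pvOcc [q] dz 0
      · simp [List.contains_iff_mem, PySem.Set.mem_ofList, hm]
      · simp [List.contains_iff_mem, PySem.Set.mem_ofList, hm]
    rw [hcf, pvOcc_filter, ih]
    simp

-- B's per-pair count equals the number of blocks containing set(x)
lemma pvCountB_eq (dz : List (List Int)) (x : List Int) :
    pvCountB (pvBuildIndex dz) (dz.length : Int) x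
      = ((dz.filter (fun y => pvIssub x y)).length : Int) := by
  unfold pvCountB
  have hfil : dz.filter (fun y => pvIssub x y) = dz.filter (fun y => pvAllIn (PySem.List.dedup x) y) := by
    apply List.filter_congr; intro y _; rw [pvIssub_eq]
  rw [hfil]
  cases hd : PySem.List.dedup x with
  | nil =>
    have hall : ∀ y ∈ dz, pvAllIn ([] : List Int) y = true := by
      intro y _; simp [pvAllIn]
    rw [show List.filter (fun y => pvAllIn [] y) dz = dz from List.filter_eq_self.mpr hall]
  | cons p rest =>
    simp only [pvCountB, hd]
    rw [pvBuildIndex_getD, pvInterLoop_occ dz rest [p], pvOcc_length]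
    rfl

-- A's inner loop: early exit iff the full count exceeds 1
lemma pvLoopA_eq (x : List Int) (l : List (List Int)) (c : Int) (h0 : 0 ≤ c) (h1 : c ≤ 1) :
    pvLoopA x l c = if c + ((l.filter (fun y => pvIssub x y)).length : Int) > 1 then none
      else some (c + ((l.filter (fun y => pvIssub x y)).length : Int)) := by
  induction l generalizing c with
  | nil =>
    simp only [pvLoopA, List.filter_nil, List.length_nil]
    have : ¬ (c + ((0:Nat) : Int) > 1) := by omega
    simp only [this, if_false]
    norm_num
  | cons y rest ih =>
    simp only [pvLoopA, List.filter_cons]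
    by_cases hs : pvIssub x y
    · simp only [hs, if_true, List.length_cons]
      by_cases hc : c + 1 > 1
      · rw [if_pos hc, if_pos (by push_cast; omega)]
      · have harith : c + 1 + ((rest.filter (fun y => pvIssub x y)).length : Int)
            = c + (((rest.filter (fun y => pvIssub x y)).length + 1 : Nat) : Int) := by
          push_cast; omega
        rw [if_neg hc, ih (c + 1) (by omega) (by omega), harith]
    · have hsf : pvIssub x y = false := by simp [hs]
      simp only [hsf, Bool.false_eq_true, if_false]
      exact ih c h0 h1

lemma pvOuter_eq (dz : List (List Int)) (xs : List (List Int)) :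
    pvOuterA dz xs = pvOuterB (pvBuildIndex dz) (dz.length : Int) xs := by
  induction xs with
  | nil => rfl
  | cons x rest ih =>
    simp only [pvOuterA, pvOuterB]
    rw [pvLoopA_eq x dz 0 (by omega) (by omega), pvCountB_eq]
    set k : Int := ((dz.filter (fun y => pvIssub x y)).length : Int) with hk
    have hk0 : 0 ≤ k := Int.natCast_nonneg _
    by_cases hgt : (0:Int) + k > 1
    · have hk1 : k > 1 := by omega
      simp [hgt, hk1]
    · have h1 : ¬ k > 1 := by omega
      have h0k : (0:Int) + k = k := by omega
      simp only [hgt, if_false, h0k]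
      by_cases hlt : k + (13 - (dz.length : Int)) < 1
      · simp [hlt, h1]
      · simp [hlt, h1, ih]

-- ===== VERDICT (by name: the statement is the Claim_ definition above) =====
theorem nijeBalansiran_spec : Claim_equal_nijeBalansiran := by
  intro paroviIzV dizajn _
  unfold Spec_nijeBalansiran nijeBalansiran nijeBalansiran_alt
  exact pvOuter_eq dizajn paroviIzV
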